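-- pv_equiv track=rewrite | github.com/fuchsst/wcsaga_godot_converter | data_converter/resource_generators/ship_class_generator.py | _determine_ship_type
-- ===== SOURCE A (Python) =====
-- def _determine_ship_type(ship_name: str) -> str:
--     """Determine ship type constant from name"""
--     name_lower = ship_name.lower()
--
--     if any(word in name_lower for word in ["fighter", "interceptor", "stealth"]):
--         return "ShipTypes.Type.FIGHTER"
--     elif any(word in name_lower for word in ["bomber", "assault"]):
--         return "ShipTypes.Type.BOMBER"
--     elif any(word in name_lower for word in ["corvette", "gunboat"]):
--         return "ShipTypes.Type.CORVETTE"
--     elif any(word in name_lower for word in ["cruiser", "destroyer"]):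
--         return "ShipTypes.Type.CRUISER"
--     elif any(word in name_lower for word in ["capital", "dreadnought", "carrier"]):
--         return "ShipTypes.Type.CAPITAL"
--     elif any(word in name_lower for word in ["transport", "cargo", "freighter"]):
--         return "ShipTypes.Type.TRANSPORT"
--     else:
--         return "ShipTypes.Type.FIGHTER"  # Default
-- ===== SOURCE B (Python) =====
-- # B: single positional scan of the name with a flat keyword->priority map, keeping the best
-- # (lowest) matched priority, instead of per-group substring membership tests in a cascade.
-- _KEYWORD_PRIORITY = {
--     "fighter": 0, "interceptor": 0, "stealth": 0,
--     "bomber": 1, "assault": 1,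
--     "corvette": 2, "gunboat": 2,
--     "cruiser": 3, "destroyer": 3,
--     "capital": 4, "dreadnought": 4, "carrier": 4,
--     "transport": 5, "cargo": 5, "freighter": 5,
-- }
-- _TYPES = [
--     "ShipTypes.Type.FIGHTER",
--     "ShipTypes.Type.BOMBER",
--     "ShipTypes.Type.CORVETTE",
--     "ShipTypes.Type.CRUISER",
--     "ShipTypes.Type.CAPITAL",
--     "ShipTypes.Type.TRANSPORT",
-- ]
--
-- def _determine_ship_type(ship_name: str) -> str:
--     name = ship_name.lower()
--     best = len(_TYPES)  # 6 = nothing matched yet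
--     for i in range(len(name)):
--         for kw, pri in _KEYWORD_PRIORITY.items():
--             if pri < best and name.startswith(kw, i):
--                 best = pri
--     return _TYPES[best] if best < len(_TYPES) else _TYPES[0]
-- ===== Notes on version B (the rewrite author's own statement) =====
-- stated objective: alternative
-- what changed: Replaces the six per-group any-substring-in-name tests of the if/elif cascade with one positional scan over the lowered name that checks a flat keyword->priority map via startswith at each offset, keeps the minimum matched priority, and indexes a type table (6 = no match defaults to FIGHTER).
import Mathlib
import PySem

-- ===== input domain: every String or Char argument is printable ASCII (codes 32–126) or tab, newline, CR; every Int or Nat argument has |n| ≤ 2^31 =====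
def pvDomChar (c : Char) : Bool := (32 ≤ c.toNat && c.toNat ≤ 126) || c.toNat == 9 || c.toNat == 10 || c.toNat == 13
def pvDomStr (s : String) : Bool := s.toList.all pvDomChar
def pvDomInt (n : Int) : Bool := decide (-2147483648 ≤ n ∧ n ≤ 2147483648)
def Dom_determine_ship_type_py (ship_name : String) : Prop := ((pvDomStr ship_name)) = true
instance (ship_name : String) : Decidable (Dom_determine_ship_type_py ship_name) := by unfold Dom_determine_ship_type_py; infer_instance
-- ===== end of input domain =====

-- B replaces A's per-group substring cascade with one positional scan keeping the minimum matched keyword priority (objective: alternative).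


-- ===== PORT A =====
def determine_ship_type_py (ship_name : String) : String :=
  let name_lower := PySem.Str.lower ship_name
  if ["fighter", "interceptor", "stealth"].any (fun w => PySem.Str.isIn w name_lower) then
    "ShipTypes.Type.FIGHTER"
  else if ["bomber", "assault"].any (fun w => PySem.Str.isIn w name_lower) then
    "ShipTypes.Type.BOMBER"
  else if ["corvette", "gunboat"].any (fun w => PySem.Str.isIn w name_lower) then
    "ShipTypes.Type.CORVETTE"
  else if ["cruiser", "destroyer"].any (fun w => PySem.Str.isIn w name_lower) then
    "ShipTypes.Type.CRUISER"
  else if ["capital", "dreadnought", "carrier"].any (fun w => PySem.Str.isIn w name_lower) then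
    "ShipTypes.Type.CAPITAL"
  else if ["transport", "cargo", "freighter"].any (fun w => PySem.Str.isIn w name_lower) then
    "ShipTypes.Type.TRANSPORT"
  else
    "ShipTypes.Type.FIGHTER"

-- ===== PORT B =====
-- Source B's _KEYWORD_PRIORITY dict, as an association list in insertion order (keywords as char lists)
def pvKwPriority : List (List Char × Nat) :=
  [ ("fighter".toList, 0), ("interceptor".toList, 0), ("stealth".toList, 0),
    ("bomber".toList, 1), ("assault".toList, 1),
    ("corvette".toList, 2), ("gunboat".toList, 2),
    ("cruiser".toList, 3), ("destroyer".toList, 3),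
    ("capital".toList, 4), ("dreadnought".toList, 4), ("carrier".toList, 4),
    ("transport".toList, 5), ("cargo".toList, 5), ("freighter".toList, 5) ]

-- Source B's _TYPES list
def pvTypes : List String :=
  [ "ShipTypes.Type.FIGHTER", "ShipTypes.Type.BOMBER", "ShipTypes.Type.CORVETTE",
    "ShipTypes.Type.CRUISER", "ShipTypes.Type.CAPITAL", "ShipTypes.Type.TRANSPORT" ]

-- inner loop body: `for kw, pri in _KEYWORD_PRIORITY.items(): if pri < best and name.startswith(kw, i): best = pri`
-- (`name.startswith(kw, i)` with 0 ≤ i ≤ len(name) is exactly `kw` being a prefix of name[i:], i.e. Chars.startswith (name.drop i) kw)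
def pvInner (name : List Char) (i : Nat) (best : Nat) : Nat :=
  pvKwPriority.foldl
    (fun b kp => if kp.2 < b ∧ PySem.Chars.startswith (name.drop i) kp.1 = true then kp.2 else b)
    best

-- outer loop `for i in range(len(name))` with accumulator best, started at len(_TYPES) = 6
def pvBest (name : List Char) : Nat :=
  (List.range name.length).foldl (fun b i => pvInner name i b) pvTypes.length

def determine_ship_type_py_alt (ship_name : String) : String :=
  let name := (PySem.Str.lower ship_name).toList
  let best := pvBest name
  if best < pvTypes.length then pvTypes.getD best "" else pvTypes.getD 0 ""

-- ===== PRECONDITION & SPEC =====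
def Spec_determine_ship_type_py (ship_name : String) (out : String) : Prop := out = determine_ship_type_py_alt ship_name
instance (ship_name : String) (out : String) : Decidable (Spec_determine_ship_type_py ship_name out) := by unfold Spec_determine_ship_type_py; infer_instance

-- ===== CLAIM (what is proved, stated in full; the proofs are below) =====
def Claim_equal_determine_ship_type_py : Prop := ∀ (ship_name : String), Dom_determine_ship_type_py ship_name → Spec_determine_ship_type_py ship_name (determine_ship_type_py ship_name)

-- ===== LEMMAS AND PROOFS =====

-- group-p match predicate: some keyword of priority p occurs in the name
def pvGM (name : List Char) (p : Nat) : Prop :=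
  ∃ kp ∈ pvKwPriority, kp.2 = p ∧ PySem.Chars.isIn kp.1 name = true

-- the inner fold never increases the accumulator
theorem pv_innerFold_le (name : List Char) (i : Nat) (t : List (List Char × Nat)) :
    ∀ b : Nat,
      t.foldl (fun b kp => if kp.2 < b ∧ PySem.Chars.startswith (name.drop i) kp.1 = true then kp.2 else b) b ≤ b := by
  induction t with
  | nil => intro b; simp
  | cons kp rest ih =>
      intro b
      simp only [List.foldl_cons]
      refine le_trans (ih _) ?_
      split_ifs with h
      · omega
      · exact le_rfl

-- the inner fold result is ≤ any matching entry's priority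
theorem pv_innerFold_le_of_mem (name : List Char) (i : Nat) (t : List (List Char × Nat)) :
    ∀ b : Nat, ∀ kp ∈ t, PySem.Chars.startswith (name.drop i) kp.1 = true →
      t.foldl (fun b kp => if kp.2 < b ∧ PySem.Chars.startswith (name.drop i) kp.1 = true then kp.2 else b) b ≤ kp.2 := by
  induction t with
  | nil => intro b kp h; simp at h
  | cons hd rest ih =>
      intro b kp hmem hsw
      simp only [List.foldl_cons]
      rcases List.mem_cons.mp hmem with rfl | hmem'
      · refine le_trans (pv_innerFold_le name i rest _) ?_
        split_ifs with h
        · exact le_rfl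
        · rw [not_and_or] at h
          rcases h with h | h
          · omega
          · exact absurd hsw h
      · exact ih _ kp hmem' hsw

-- the inner fold result is either the start value or a matching entry's priority
theorem pv_innerFold_cases (name : List Char) (i : Nat) (t : List (List Char × Nat)) :
    ∀ b : Nat,
      (t.foldl (fun b kp => if kp.2 < b ∧ PySem.Chars.startswith (name.drop i) kp.1 = true then kp.2 else b) b = b)
      ∨ ∃ kp ∈ t,
          t.foldl (fun b kp => if kp.2 < b ∧ PySem.Chars.startswith (name.drop i) kp.1 = true then kp.2 else b) b = kp.2
          ∧ PySem.Chars.startswith (name.drop i) kp.1 = true := by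
  induction t with
  | nil => intro b; left; simp
  | cons hd rest ih =>
      intro b
      simp only [List.foldl_cons]
      by_cases h : hd.2 < b ∧ PySem.Chars.startswith (name.drop i) hd.1 = true
      · rw [if_pos h]
        rcases ih hd.2 with heq | ⟨kp, hmem, heq, hsw⟩
        · exact Or.inr ⟨hd, List.mem_cons_self .., heq, h.2⟩
        · exact Or.inr ⟨kp, List.mem_cons_of_mem _ hmem, heq, hsw⟩
      · rw [if_neg h]
        rcases ih b with heq | ⟨kp, hmem, heq, hsw⟩
        · exact Or.inl heq
        · exact Or.inr ⟨kp, List.mem_cons_of_mem _ hmem, heq, hsw⟩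

-- outer fold: never increases the accumulator
theorem pv_outerFold_le (name : List Char) (L : List Nat) :
    ∀ b : Nat, L.foldl (fun b i => pvInner name i b) b ≤ b := by
  induction L with
  | nil => intro b; simp
  | cons i rest ih =>
      intro b
      simp only [List.foldl_cons]
      exact le_trans (ih _) (pv_innerFold_le name i pvKwPriority b)

-- outer fold: bounded by any priority matched at some visited position
theorem pv_outerFold_le_of_match (name : List Char) (L : List Nat) :
    ∀ b : Nat, ∀ i ∈ L, ∀ kp ∈ pvKwPriority, PySem.Chars.startswith (name.drop i) kp.1 = true →
      L.foldl (fun b i => pvInner name i b) b ≤ kp.2 := by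
  induction L with
  | nil => intro b i h; simp at h
  | cons j rest ih =>
      intro b i hmem kp hkp hsw
      simp only [List.foldl_cons]
      rcases List.mem_cons.mp hmem with rfl | hmem'
      · exact le_trans (pv_outerFold_le name rest _)
          (pv_innerFold_le_of_mem name i pvKwPriority b kp hkp hsw)
      · exact ih _ i hmem' kp hkp hsw

-- outer fold: the result is the start value or a priority matched at a visited position
theorem pv_outerFold_cases (name : List Char) (L : List Nat) :
    ∀ b : Nat,
      (L.foldl (fun b i => pvInner name i b) b = b)
      ∨ ∃ kp ∈ pvKwPriority,
          L.foldl (fun b i => pvInner name i b) b = kp.2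
          ∧ ∃ i ∈ L, PySem.Chars.startswith (name.drop i) kp.1 = true := by
  induction L with
  | nil => intro b; left; simp
  | cons j rest ih =>
      intro b
      simp only [List.foldl_cons]
      rcases ih (pvInner name j b) with heq | ⟨kp, hkp, heq, i, hi, hsw⟩
      · rw [heq]
        rcases pv_innerFold_cases name j pvKwPriority b with h | ⟨kp, hkp, h, hsw⟩
        · exact Or.inl h
        · exact Or.inr ⟨kp, hkp, h, j, List.mem_cons_self .., hsw⟩
      · exact Or.inr ⟨kp, hkp, heq, i, List.mem_cons_of_mem _ hi, hsw⟩

-- a nonempty keyword occurs as a substring iff it starts at some position < length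
theorem pv_exists_pos_iff (name kw : List Char) (hne : kw ≠ []) :
    (∃ i ∈ List.range name.length, PySem.Chars.startswith (name.drop i) kw = true)
      ↔ PySem.Chars.isIn kw name = true := by
  constructor
  · rintro ⟨i, _, hsw⟩
    exact (PySem.Chars.exists_prefix_drop_iff_isIn kw name).mp
      ⟨i, (PySem.Chars.startswith_iff _ _).mp hsw⟩
  · intro hin
    rcases (PySem.Chars.exists_prefix_drop_iff_isIn kw name).mpr hin with ⟨j, hpre⟩
    refine ⟨j, List.mem_range.mpr ?_, (PySem.Chars.startswith_iff _ _).mpr hpre⟩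
    by_contra hj
    rw [List.drop_eq_nil_of_le (Nat.le_of_not_lt hj)] at hpre
    exact hne (List.prefix_nil.mp hpre)

theorem pvKw_ne_nil : ∀ kp ∈ pvKwPriority, kp.1 ≠ [] := by decide

theorem pvKw_lt6 : ∀ kp ∈ pvKwPriority, kp.2 < 6 := by decide

-- pvBest is ≤ p whenever group p matches
theorem pvBest_le_of_GM (name : List Char) (p : Nat) (h : pvGM name p) : pvBest name ≤ p := by
  rcases h with ⟨kp, hkp, hp, hin⟩
  rcases (pv_exists_pos_iff name kp.1 (pvKw_ne_nil kp hkp)).mpr hin with ⟨i, hi, hsw⟩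
  have := pv_outerFold_le_of_match name (List.range name.length) pvTypes.length i hi kp hkp hsw
  simpa [pvBest, hp] using this

-- pvBest is 6 or a matched group's priority
theorem pvBest_spec (name : List Char) :
    pvBest name = 6 ∨ (pvBest name < 6 ∧ pvGM name (pvBest name)) := by
  rcases pv_outerFold_cases name (List.range name.length) pvTypes.length with h | ⟨kp, hkp, heq, i, hi, hsw⟩
  · left; simpa [pvBest, pvTypes] using h
  · right
    have heq' : pvBest name = kp.2 := by simpa [pvBest] using heq
    have hin : PySem.Chars.isIn kp.1 name = true :=
      (pv_exists_pos_iff name kp.1 (pvKw_ne_nil kp hkp)).mp ⟨i, hi, hsw⟩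
    exact ⟨heq' ▸ pvKw_lt6 kp hkp, heq' ▸ ⟨kp, hkp, rfl, hin⟩⟩

-- ===== VERDICT (by name: the statement is the Claim_ definition above) =====
theorem determine_ship_type_py_spec : Claim_equal_determine_ship_type_py := by
  intro s _
  show determine_ship_type_py s = determine_ship_type_py_alt s
  have h0 : (["fighter", "interceptor", "stealth"].any (fun w => PySem.Str.isIn w (PySem.Str.lower s)) = true) ↔ pvGM (PySem.Str.lower s).toList 0 := by
    simp [pvGM, pvKwPriority]
  have h1 : (["bomber", "assault"].any (fun w => PySem.Str.isIn w (PySem.Str.lower s)) = true) ↔ pvGM (PySem.Str.lower s).toList 1 := by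
    simp [pvGM, pvKwPriority]
  have h2 : (["corvette", "gunboat"].any (fun w => PySem.Str.isIn w (PySem.Str.lower s)) = true) ↔ pvGM (PySem.Str.lower s).toList 2 := by
    simp [pvGM, pvKwPriority]
  have h3 : (["cruiser", "destroyer"].any (fun w => PySem.Str.isIn w (PySem.Str.lower s)) = true) ↔ pvGM (PySem.Str.lower s).toList 3 := by
    simp [pvGM, pvKwPriority]
  have h4 : (["capital", "dreadnought", "carrier"].any (fun w => PySem.Str.isIn w (PySem.Str.lower s)) = true) ↔ pvGM (PySem.Str.lower s).toList 4 := by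
    simp [pvGM, pvKwPriority]
  have h5 : (["transport", "cargo", "freighter"].any (fun w => PySem.Str.isIn w (PySem.Str.lower s)) = true) ↔ pvGM (PySem.Str.lower s).toList 5 := by
    simp [pvGM, pvKwPriority]
  simp only [determine_ship_type_py, determine_ship_type_py_alt]
  by_cases g0 : pvGM (PySem.Str.lower s).toList 0
  · have hb : pvBest (PySem.Str.lower s).toList = 0 :=
      Nat.le_zero.mp (pvBest_le_of_GM _ 0 g0)
    rw [if_pos (h0.mpr g0), hb]
    rfl
  · by_cases g1 : pvGM (PySem.Str.lower s).toList 1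
    · have hle := pvBest_le_of_GM _ 1 g1
      have hb : pvBest (PySem.Str.lower s).toList = 1 := by
        rcases pvBest_spec (PySem.Str.lower s).toList with h6 | ⟨hlt, hgm⟩
        · omega
        · have hc : pvBest (PySem.Str.lower s).toList = 0 ∨
              pvBest (PySem.Str.lower s).toList = 1 := by omega
          rcases hc with hc | hc
          · exact absurd (hc ▸ hgm) g0
          · exact hc
      rw [if_neg (fun hc => g0 (h0.mp hc)), if_pos (h1.mpr g1), hb]
      rfl
    · by_cases g2 : pvGM (PySem.Str.lower s).toList 2
      · have hle := pvBest_le_of_GM _ 2 g2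
        have hb : pvBest (PySem.Str.lower s).toList = 2 := by
          rcases pvBest_spec (PySem.Str.lower s).toList with h6 | ⟨hlt, hgm⟩
          · omega
          · have hc : pvBest (PySem.Str.lower s).toList = 0 ∨
                pvBest (PySem.Str.lower s).toList = 1 ∨
                pvBest (PySem.Str.lower s).toList = 2 := by omega
            rcases hc with hc | hc | hc
            · exact absurd (hc ▸ hgm) g0
            · exact absurd (hc ▸ hgm) g1
            · exact hc
        rw [if_neg (fun hc => g0 (h0.mp hc)), if_neg (fun hc => g1 (h1.mp hc)),
            if_pos (h2.mpr g2), hb]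
        rfl
      · by_cases g3 : pvGM (PySem.Str.lower s).toList 3
        · have hle := pvBest_le_of_GM _ 3 g3
          have hb : pvBest (PySem.Str.lower s).toList = 3 := by
            rcases pvBest_spec (PySem.Str.lower s).toList with h6 | ⟨hlt, hgm⟩
            · omega
            · have hc : pvBest (PySem.Str.lower s).toList = 0 ∨
                  pvBest (PySem.Str.lower s).toList = 1 ∨
                  pvBest (PySem.Str.lower s).toList = 2 ∨
                  pvBest (PySem.Str.lower s).toList = 3 := by omega
              rcases hc with hc | hc | hc | hc
              · exact absurd (hc ▸ hgm) g0
              · exact absurd (hc ▸ hgm) g1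
              · exact absurd (hc ▸ hgm) g2
              · exact hc
          rw [if_neg (fun hc => g0 (h0.mp hc)), if_neg (fun hc => g1 (h1.mp hc)),
              if_neg (fun hc => g2 (h2.mp hc)), if_pos (h3.mpr g3), hb]
          rfl
        · by_cases g4 : pvGM (PySem.Str.lower s).toList 4
          · have hle := pvBest_le_of_GM _ 4 g4
            have hb : pvBest (PySem.Str.lower s).toList = 4 := by
              rcases pvBest_spec (PySem.Str.lower s).toList with h6 | ⟨hlt, hgm⟩
              · omega
              · have hc : pvBest (PySem.Str.lower s).toList = 0 ∨
                    pvBest (PySem.Str.lower s).toList = 1 ∨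
                    pvBest (PySem.Str.lower s).toList = 2 ∨
                    pvBest (PySem.Str.lower s).toList = 3 ∨
                    pvBest (PySem.Str.lower s).toList = 4 := by omega
                rcases hc with hc | hc | hc | hc | hc
                · exact absurd (hc ▸ hgm) g0
                · exact absurd (hc ▸ hgm) g1
                · exact absurd (hc ▸ hgm) g2
                · exact absurd (hc ▸ hgm) g3
                · exact hc
            rw [if_neg (fun hc => g0 (h0.mp hc)), if_neg (fun hc => g1 (h1.mp hc)),
                if_neg (fun hc => g2 (h2.mp hc)), if_neg (fun hc => g3 (h3.mp hc)),
                if_pos (h4.mpr g4), hb]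
            rfl
          · by_cases g5 : pvGM (PySem.Str.lower s).toList 5
            · have hle := pvBest_le_of_GM _ 5 g5
              have hb : pvBest (PySem.Str.lower s).toList = 5 := by
                rcases pvBest_spec (PySem.Str.lower s).toList with h6 | ⟨hlt, hgm⟩
                · omega
                · have hc : pvBest (PySem.Str.lower s).toList = 0 ∨
                      pvBest (PySem.Str.lower s).toList = 1 ∨
                      pvBest (PySem.Str.lower s).toList = 2 ∨
                      pvBest (PySem.Str.lower s).toList = 3 ∨
                      pvBest (PySem.Str.lower s).toList = 4 ∨
                      pvBest (PySem.Str.lower s).toList = 5 := by omega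
                  rcases hc with hc | hc | hc | hc | hc | hc
                  · exact absurd (hc ▸ hgm) g0
                  · exact absurd (hc ▸ hgm) g1
                  · exact absurd (hc ▸ hgm) g2
                  · exact absurd (hc ▸ hgm) g3
                  · exact absurd (hc ▸ hgm) g4
                  · exact hc
              rw [if_neg (fun hc => g0 (h0.mp hc)), if_neg (fun hc => g1 (h1.mp hc)),
                  if_neg (fun hc => g2 (h2.mp hc)), if_neg (fun hc => g3 (h3.mp hc)),
                  if_neg (fun hc => g4 (h4.mp hc)), if_pos (h5.mpr g5), hb]
              rfl
            · have hb : pvBest (PySem.Str.lower s).toList = 6 := by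
                rcases pvBest_spec (PySem.Str.lower s).toList with h6 | ⟨hlt, hgm⟩
                · exact h6
                · have hc : pvBest (PySem.Str.lower s).toList = 0 ∨
                      pvBest (PySem.Str.lower s).toList = 1 ∨
                      pvBest (PySem.Str.lower s).toList = 2 ∨
                      pvBest (PySem.Str.lower s).toList = 3 ∨
                      pvBest (PySem.Str.lower s).toList = 4 ∨
                      pvBest (PySem.Str.lower s).toList = 5 := by omega
                  rcases hc with hc | hc | hc | hc | hc | hc
                  · exact absurd (hc ▸ hgm) g0
                  · exact absurd (hc ▸ hgm) g1
                  · exact absurd (hc ▸ hgm) g2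
                  · exact absurd (hc ▸ hgm) g3
                  · exact absurd (hc ▸ hgm) g4
                  · exact absurd (hc ▸ hgm) g5
              rw [if_neg (fun hc => g0 (h0.mp hc)), if_neg (fun hc => g1 (h1.mp hc)),
                  if_neg (fun hc => g2 (h2.mp hc)), if_neg (fun hc => g3 (h3.mp hc)),
                  if_neg (fun hc => g4 (h4.mp hc)), if_neg (fun hc => g5 (h5.mp hc)), hb]
              rfl
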